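-- pv_equiv track=rewrite | github.com/trevorlangston/aoc2018 | 5/helper.py | react_length
-- ===== SOURCE A (Python) =====
-- def react_length(str, skip_char=''):
--     stack = []
--     for char in str:
--         if char.upper() == skip_char.upper():
--             continue
--
--         if len(stack) and cancel(stack[-1], char):
--             stack.pop()
--         else:
--             stack.append(char)
--
--     return len(stack)
--
-- def cancel(a, b):
--     if is_upper(a):
--         if a.lower() == b:
--             return True
--         return False
--     if a.upper() == b:
--         return True
--     return False
--
-- def is_upper(a):
--     if a.upper() == a:
--         return True
--     return False
-- ===== SOURCE B (Python) =====
-- # B: filter the skipped unit out once, then repeatedly sweep the whole list left to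
-- # right removing adjacent cancelling pairs until a sweep changes nothing.
-- def react_length(str, skip_char=''):
--     chars = [c for c in str if c.upper() != skip_char.upper()]
--     changed = True
--     while changed:
--         changed = False
--         out = []
--         i = 0
--         n = len(chars)
--         while i < n:
--             if i + 1 < n and cancel(chars[i], chars[i + 1]):
--                 i += 2
--                 changed = True
--             else:
--                 out.append(chars[i])
--                 i += 1
--         chars = out
--     return len(chars)
--
--
-- def cancel(a, b):
--     if is_upper(a):
--         if a.lower() == b:
--             return True
--         return False
--     if a.upper() == b:
--         return True
--     return False
--
--
-- def is_upper(a):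
--     if a.upper() == a:
--         return True
--     return False
-- ===== Notes on version B (the rewrite author's own statement) =====
-- stated objective: alternative
-- what changed: Replaces A's single stack pass by a skip-filter followed by repeated whole-list sweeps that drop adjacent cancelling pairs until a sweep changes nothing; equality of the final lengths rests on the cancel relation pairing each character with a unique involutive partner.
import Mathlib
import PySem

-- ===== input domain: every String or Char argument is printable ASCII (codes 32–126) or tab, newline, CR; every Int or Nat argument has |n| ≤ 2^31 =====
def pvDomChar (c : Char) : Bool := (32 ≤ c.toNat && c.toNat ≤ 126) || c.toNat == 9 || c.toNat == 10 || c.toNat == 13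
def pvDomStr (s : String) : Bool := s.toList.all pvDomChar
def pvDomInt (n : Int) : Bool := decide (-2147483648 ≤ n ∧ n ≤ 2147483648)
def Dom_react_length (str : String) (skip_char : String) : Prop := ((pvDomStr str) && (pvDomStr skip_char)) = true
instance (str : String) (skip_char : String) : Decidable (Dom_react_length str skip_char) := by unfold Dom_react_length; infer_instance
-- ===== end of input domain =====

-- B replaces A's single stack pass by a filter followed by iterated whole-list removal of
-- adjacent cancelling pairs until a pass changes nothing (objective: alternative algorithm).

-- ===== PORT A =====
-- is_upper(a): a.upper() == a   (a is a 1-character string)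
def pv_is_upper (a : Char) : Bool :=
  if PySem.Chars.upper [a] == [a] then true else false

-- cancel(a, b), verbatim branch order
def pv_cancel (a b : Char) : Bool :=
  if pv_is_upper a then
    if PySem.Chars.lower [a] == [b] then true else false
  else
    if PySem.Chars.upper [a] == [b] then true else false

-- one loop body of A: 'if len(stack) and cancel(stack[-1], char): stack.pop() else: stack.append(char)'
-- (the Python stack grows at its right end; here the top is the HEAD of the list,
--  so stack[-1] is the head, pop is tail, append is cons — the same stack, mirrored)
def pv_push (stack : List Char) (char : Char) : List Char :=
  match stack with
  | top :: rest => if pv_cancel top char then rest else char :: top :: rest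
  | [] => [char]

def react_length (str : String) (skip_char : String) : Int :=
  ((str.toList.foldl (fun stack char =>
    if PySem.Chars.upper [char] == (PySem.Str.upper skip_char).toList then stack
    else pv_push stack char) []).length : Int)

-- ===== PORT B =====
-- one left-to-right pass of B's inner while-loop over chars: returns (out, changed)
def pv_pass : List Char → List Char × Bool
  | x :: y :: t =>
    if pv_cancel x y then ((pv_pass t).1, true)
    else ((x :: (pv_pass (y :: t)).1), (pv_pass (y :: t)).2)
  | l => (l, false)

-- the next two lemmas justify termination of B's outer while-loop
theorem pv_pass_len_le : ∀ l : List Char, (pv_pass l).1.length ≤ l.length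
  | [] => by simp [pv_pass]
  | [x] => by simp [pv_pass]
  | x :: y :: t => by
    by_cases h : pv_cancel x y = true
    · simp only [pv_pass, h, if_pos]
      have := pv_pass_len_le t
      simp only [List.length_cons]; omega
    · simp only [pv_pass, h, Bool.false_eq_true, not_false_iff, if_neg, List.length_cons]
      have := pv_pass_len_le (y :: t)
      simp only [List.length_cons] at this ⊢; omega

theorem pv_pass_progress : ∀ l : List Char, (pv_pass l).2 = true → (pv_pass l).1.length < l.length
  | [] => by simp [pv_pass]
  | [x] => by simp [pv_pass]
  | x :: y :: t => by
    by_cases h : pv_cancel x y = true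
    · intro _
      simp only [pv_pass, h, if_pos]
      have := pv_pass_len_le t
      simp only [List.length_cons]; omega
    · simp only [pv_pass, h, Bool.false_eq_true, not_false_iff, if_neg, List.length_cons]
      intro hch
      have := pv_pass_progress (y :: t) hch
      simp only [List.length_cons] at this ⊢; omega

-- B's outer while-loop: repeat the pass while it changed something
def pv_reduce (l : List Char) : List Char :=
  if h : (pv_pass l).2 = true then pv_reduce (pv_pass l).1 else (pv_pass l).1
termination_by l.length
decreasing_by exact pv_pass_progress l h

def react_length_alt (str : String) (skip_char : String) : Int :=
  ((pv_reduce (str.toList.filter (fun c =>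
    PySem.Chars.upper [c] != (PySem.Str.upper skip_char).toList))).length : Int)

-- ===== PRECONDITION & SPEC =====
def Spec_react_length (str : String) (skip_char : String) (out : Int) : Prop := out = react_length_alt str skip_char
instance (str : String) (skip_char : String) (out : Int) : Decidable (Spec_react_length str skip_char out) := by unfold Spec_react_length; infer_instance

-- ===== CLAIM (what is proved, stated in full; the proofs are below) =====
def Claim_equal_react_length : Prop := ∀ (str : String) (skip_char : String), Dom_react_length str skip_char → Spec_react_length str skip_char (react_length str skip_char)

-- ===== LEMMAS AND PROOFS =====

-- the unique character b with cancel(a, b): cancel a b = true ↔ b = pv_partner a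
def pv_partner (c : Char) : Char :=
  if pv_is_upper c then PySem.Chars.lowerChar c else PySem.Chars.upperChar c

theorem pv_islower_iff (c : Char) : PySem.Chars.islower c = true ↔ 97 ≤ c.toNat ∧ c.toNat ≤ 122 := by
  simp only [PySem.Chars.islower, Bool.and_eq_true, decide_eq_true_eq, Char.le_def,
    UInt32.le_iff_toNat_le]
  constructor <;> (intro h; exact ⟨h.1, h.2⟩)

theorem pv_isupper_iff (c : Char) : PySem.Chars.isupper c = true ↔ 65 ≤ c.toNat ∧ c.toNat ≤ 90 := by
  simp only [PySem.Chars.isupper, Bool.and_eq_true, decide_eq_true_eq, Char.le_def,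
    UInt32.le_iff_toNat_le]
  constructor <;> (intro h; exact ⟨h.1, h.2⟩)

theorem pv_toNat_ofNat (n : Nat) (h : n < 55296) : (Char.ofNat n).toNat = n := by
  rw [Char.toNat_ofNat, if_pos]
  simp only [Nat.isValidChar]
  omega

theorem pv_char_ext (c d : Char) (h : c.toNat = d.toNat) : c = d :=
  Char.ext (UInt32.toNat_inj.mp h)

theorem pv_is_upper_eq (c : Char) : pv_is_upper c = (PySem.Chars.upperChar c == c) := by
  simp [pv_is_upper, PySem.Chars.upper, Bool.beq_eq_decide_eq]

theorem pv_toNat_upperChar (c : Char) :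
    (PySem.Chars.upperChar c).toNat = if 97 ≤ c.toNat ∧ c.toNat ≤ 122 then c.toNat - 32 else c.toNat := by
  unfold PySem.Chars.upperChar
  by_cases h : PySem.Chars.islower c = true
  · rw [if_pos h, if_pos ((pv_islower_iff c).mp h)]
    have := (pv_islower_iff c).mp h
    exact pv_toNat_ofNat _ (by omega)
  · rw [if_neg h, if_neg (fun hc => h ((pv_islower_iff c).mpr hc))]

theorem pv_toNat_lowerChar (c : Char) :
    (PySem.Chars.lowerChar c).toNat = if 65 ≤ c.toNat ∧ c.toNat ≤ 90 then c.toNat + 32 else c.toNat := by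
  unfold PySem.Chars.lowerChar
  by_cases h : PySem.Chars.isupper c = true
  · rw [if_pos h, if_pos ((pv_isupper_iff c).mp h)]
    have hb := (pv_isupper_iff c).mp h
    exact pv_toNat_ofNat _ (by omega)
  · rw [if_neg h, if_neg (fun hc => h ((pv_isupper_iff c).mpr hc))]

theorem pv_is_upper_iff (c : Char) : pv_is_upper c = true ↔ ¬ (97 ≤ c.toNat ∧ c.toNat ≤ 122) := by
  rw [pv_is_upper_eq, beq_iff_eq]
  constructor
  · intro h hc
    have := pv_toNat_upperChar c
    rw [if_pos hc, h] at this
    omega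
  · intro hc
    apply pv_char_ext
    rw [pv_toNat_upperChar, if_neg hc]

-- on every Char, taking the cancel-partner twice comes back (this is what makes cancel symmetric)
theorem pv_partner_partner (c : Char) : pv_partner (pv_partner c) = c := by
  apply pv_char_ext
  by_cases h : pv_is_upper c = true
  · have hnl : ¬ (97 ≤ c.toNat ∧ c.toNat ≤ 122) := (pv_is_upper_iff c).mp h
    by_cases hu : 65 ≤ c.toNat ∧ c.toNat ≤ 90
    · have h1 : (PySem.Chars.lowerChar c).toNat = c.toNat + 32 := by
        rw [pv_toNat_lowerChar, if_pos hu]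
      have h2 : ¬ pv_is_upper (PySem.Chars.lowerChar c) = true := by
        rw [pv_is_upper_iff]; omega
      unfold pv_partner
      rw [if_pos h, if_neg h2, pv_toNat_upperChar, h1, if_pos (by omega)]
      omega
    · have h1 : (PySem.Chars.lowerChar c).toNat = c.toNat := by
        rw [pv_toNat_lowerChar, if_neg hu]
      have hc : PySem.Chars.lowerChar c = c := pv_char_ext _ _ h1
      unfold pv_partner
      rw [if_pos h, hc, if_pos h, hc]
  · have hl : 97 ≤ c.toNat ∧ c.toNat ≤ 122 := by
      by_contra hc; exact h ((pv_is_upper_iff c).mpr hc)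
    have h1 : (PySem.Chars.upperChar c).toNat = c.toNat - 32 := by
      rw [pv_toNat_upperChar, if_pos hl]
    have h2 : pv_is_upper (PySem.Chars.upperChar c) = true := by
      rw [pv_is_upper_iff]; omega
    unfold pv_partner
    rw [if_neg h, if_pos h2, pv_toNat_lowerChar, h1, if_pos (by omega)]
    omega

theorem pv_cancel_iff (a b : Char) : pv_cancel a b = true ↔ b = pv_partner a := by
  unfold pv_cancel pv_partner
  by_cases h : pv_is_upper a = true
  · rw [if_pos h, if_pos h]
    simp only [PySem.Chars.lower, List.map]
    constructor
    · intro hb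
      by_cases hq : ([PySem.Chars.lowerChar a] == [b]) = true
      · simp only [beq_iff_eq, List.cons.injEq, and_true] at hq; exact hq.symm
      · rw [if_neg hq] at hb; exact absurd hb (by simp)
    · intro hb; subst hb; simp only [beq_self_eq_true, if_true]
  · rw [if_neg h, if_neg h]
    simp only [PySem.Chars.upper, List.map]
    constructor
    · intro hb
      by_cases hq : ([PySem.Chars.upperChar a] == [b]) = true
      · simp only [beq_iff_eq, List.cons.injEq, and_true] at hq; exact hq.symm
      · rw [if_neg hq] at hb; exact absurd hb (by simp)
    · intro hb; subst hb; simp only [beq_self_eq_true, if_true]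

-- A's stack never holds an adjacent cancelling pair (head = top of stack)
def pvReduced (s : List Char) : Prop := List.IsChain (fun a b => pv_cancel b a = false) s

theorem pv_push_cons (top : Char) (rest : List Char) (c : Char) :
    pv_push (top :: rest) c = if pv_cancel top c = true then rest else c :: top :: rest := rfl

theorem pv_push_reduced (s : List Char) (c : Char) (h : pvReduced s) : pvReduced (pv_push s c) := by
  unfold pvReduced
  match s with
  | [] => simp [pv_push]
  | top :: rest =>
    rw [pv_push_cons]
    by_cases hc : pv_cancel top c = true
    · rw [if_pos hc]
      exact h.tail
    · rw [if_neg hc]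
      exact h.cons (by simpa using hc)

-- pushing a cancelling pair onto a reduced stack is a no-op
theorem pv_push_push (s : List Char) (c d : Char) (h : pvReduced s) (hc : pv_cancel c d = true) :
    pv_push (pv_push s c) d = s := by
  match s with
  | [] =>
    simp only [pv_push, hc, if_pos]
  | x :: s' =>
    by_cases hx : pv_cancel x c = true
    · have hd : d = x := by
        have h1 := (pv_cancel_iff c d).mp hc
        have h2 := (pv_cancel_iff x c).mp hx
        rw [h1, h2, pv_partner_partner]
      subst hd
      simp only [pv_push, hx, if_pos]
      match s' with
      | [] => rfl
      | y :: s'' =>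
        have hny : pv_cancel y d = false := (List.isChain_cons_cons.mp h).1
        simp [hny]
    · simp [pv_push, hx, hc]

-- one pass of B does not change what A's stack fold computes
theorem pv_foldl_pass : ∀ l s : List Char, pvReduced s →
    List.foldl pv_push s (pv_pass l).1 = List.foldl pv_push s l
  | [], s, _ => by simp [pv_pass]
  | [x], s, _ => by simp [pv_pass]
  | x :: y :: t, s, hs => by
    by_cases h : pv_cancel x y = true
    · simp only [pv_pass, h, if_pos]
      rw [pv_foldl_pass t s hs]
      simp only [List.foldl_cons]
      rw [show pv_push (pv_push s x) y = s from pv_push_push s x y hs h]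
    · simp only [pv_pass, h, Bool.false_eq_true, not_false_iff, if_neg, List.foldl_cons]
      exact pv_foldl_pass (y :: t) (pv_push s x) (pv_push_reduced s x hs)

theorem pv_foldl_reduce (l : List Char) (s : List Char) (hs : pvReduced s) :
    List.foldl pv_push s (pv_reduce l) = List.foldl pv_push s l := by
  unfold pv_reduce
  by_cases h : (pv_pass l).2 = true
  · rw [dif_pos h, pv_foldl_reduce (pv_pass l).1 s hs, pv_foldl_pass l s hs]
  · rw [dif_neg h, pv_foldl_pass l s hs]
termination_by l.length
decreasing_by exact pv_pass_progress l h

theorem pv_pass_fix : ∀ l : List Char, (pv_pass l).2 = false → (pv_pass l).1 = l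
  | [], _ => rfl
  | [x], _ => rfl
  | x :: y :: t, h => by
    by_cases hc : pv_cancel x y = true
    · simp [pv_pass, hc] at h
    · simp only [pv_pass, hc, Bool.false_eq_true, not_false_iff, if_neg] at h ⊢
      rw [pv_pass_fix (y :: t) h]

theorem pv_pass_chain : ∀ l : List Char, (pv_pass l).2 = false →
    List.IsChain (fun a b => pv_cancel a b = false) l
  | [], _ => by simp
  | [x], _ => by simp
  | x :: y :: t, h => by
    by_cases hc : pv_cancel x y = true
    · simp [pv_pass, hc] at h
    · simp only [pv_pass, hc, Bool.false_eq_true, not_false_iff, if_neg] at h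
      exact (pv_pass_chain (y :: t) h).cons (by simpa using hc)

theorem pv_reduce_fix (l : List Char) : (pv_pass (pv_reduce l)).2 = false := by
  unfold pv_reduce
  by_cases h : (pv_pass l).2 = true
  · rw [dif_pos h]; exact pv_reduce_fix (pv_pass l).1
  · rw [dif_neg h]
    rw [pv_pass_fix l (by simpa using h)]
    simpa using h
termination_by l.length
decreasing_by exact pv_pass_progress l h

-- on a list with no adjacent cancelling pair, A's stack fold only ever pushes
theorem pv_foldl_chain : ∀ (l s : List Char),
    List.IsChain (fun a b => pv_cancel a b = false) (s.reverse ++ l) →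
    List.foldl pv_push s l = l.reverse ++ s
  | [], s, _ => by simp
  | x :: t, s, h => by
    have hpush : pv_push s x = x :: s := by
      match s with
      | [] => rfl
      | h' :: r =>
        have hlast : pv_cancel h' x = false :=
          (List.isChain_append.mp h).2.2 h' (by simp) x (by simp)
        rw [pv_push_cons, if_neg (by simp [hlast])]
    rw [List.foldl_cons, hpush, pv_foldl_chain t (x :: s) (by simpa using h)]
    simp

-- A's stack and B's fixpoint have the same length on any char list
theorem pv_main (l : List Char) : (List.foldl pv_push [] l).length = (pv_reduce l).length := by
  have h1 : List.foldl pv_push [] (pv_reduce l) = List.foldl pv_push [] l :=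
    pv_foldl_reduce l [] (by simp [pvReduced])
  have h2 : List.foldl pv_push [] (pv_reduce l) = (pv_reduce l).reverse ++ [] := by
    apply pv_foldl_chain
    simpa using pv_pass_chain _ (pv_reduce_fix l)
  rw [← h1, h2]
  simp

-- ===== VERDICT (by name: the statement is the Claim_ definition above) =====
theorem react_length_spec : Claim_equal_react_length := by
  intro str skip_char _
  unfold Spec_react_length react_length react_length_alt
  rw [← pv_main, List.foldl_filter]
  have hfun : (fun (x : List Char) (y : Char) =>
      if (PySem.Chars.upper [y] != (PySem.Str.upper skip_char).toList) = true then pv_push x y else x) =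
      (fun stack char =>
      if (PySem.Chars.upper [char] == (PySem.Str.upper skip_char).toList) = true then stack
      else pv_push stack char) := by
    funext x y
    by_cases h : (PySem.Chars.upper [y] == (PySem.Str.upper skip_char).toList) = true <;>
      simp [h]
  rw [hfun]
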